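-- pv_equiv track=rewrite | github.com/raulradulescu/Graph-Theory-and-Combinatorics-Homework | hw3.py | next_r_permutation_with_repetition
-- ===== SOURCE A (Python) =====
-- def next_r_permutation_with_repetition(permutation, n):
--     """
--     Computes the r-permutation with repetition immediately after the given
--     permutation in lexicographic order.
--     """
--     r = len(permutation)
--     for i in reversed(range(r)):
--         if permutation[i] < n:
--             permutation[i] += 1
--             return permutation
--         else:
--             permutation[i] = 1
--     return permutation  # If no next permutation, this wraps around to the first permutation
-- ===== SOURCE B (Python) =====
-- def next_r_permutation_with_repetition(permutation, n):
--     """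
--     Computes the r-permutation with repetition immediately after the given
--     permutation in lexicographic order.
--     """
--     def nxt(p):
--         # structural recursion peeling the last digit: increment it if it can
--         # still grow, otherwise recurse on the prefix and append a reset digit
--         if not p:
--             return []
--         if p[-1] < n:
--             return p[:-1] + [p[-1] + 1]
--         return nxt(p[:-1]) + [1]
--     permutation[:] = nxt(permutation)
--     return permutation
-- ===== Notes on version B (the rewrite author's own statement) =====
-- stated objective: alternative
-- what changed: A runs an iterative index loop right-to-left, mutating entries in place with an early return inside the carry loop; B is a pure structural recursion that peels the last digit, either incrementing it or recursing on the prefix and appending a reset digit, then assigns the rebuilt list back.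
import Mathlib
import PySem

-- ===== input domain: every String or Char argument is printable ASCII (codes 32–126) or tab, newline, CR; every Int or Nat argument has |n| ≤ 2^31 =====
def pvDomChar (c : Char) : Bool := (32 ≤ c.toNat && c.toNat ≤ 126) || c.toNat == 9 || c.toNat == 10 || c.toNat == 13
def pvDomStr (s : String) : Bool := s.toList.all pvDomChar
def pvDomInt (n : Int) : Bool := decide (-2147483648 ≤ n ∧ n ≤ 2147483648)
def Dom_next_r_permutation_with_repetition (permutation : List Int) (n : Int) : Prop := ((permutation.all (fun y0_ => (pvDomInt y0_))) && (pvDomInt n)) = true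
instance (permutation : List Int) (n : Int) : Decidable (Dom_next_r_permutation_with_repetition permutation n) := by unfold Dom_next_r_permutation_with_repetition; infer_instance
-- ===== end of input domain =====

-- B replaces A's iterative right-to-left in-place carry loop by a pure structural recursion that
-- peels the last digit (increment it, or recurse on the prefix and append a reset digit).
-- Equivalence is about the RETURN value; B performs the same in-place assignment as A.

-- ===== PORT A =====
-- the loop 'for i in reversed(range(r)): …' with its early return, recursing over the index list
def pvGoA (n : Int) (idxs : List Nat) (perm : List Int) : List Int :=
  match idxs with
  | [] => perm
  | i :: rest =>
    match PySem.List.pyGet? perm (Int.ofNat i) with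
    | none => perm  -- unreachable: every i is < perm.length
    | some v => if v < n then perm.set i (v + 1) else pvGoA n rest (perm.set i 1)

def next_r_permutation_with_repetition (permutation : List Int) (n : Int) : List Int :=
  pvGoA n (List.range permutation.length).reverse permutation

-- ===== PORT B =====
-- Source B's helper nxt: structural recursion on the prefix p[:-1]
def pvNxt (n : Int) (p : List Int) : List Int :=
  if hp : p = [] then []
  else if p.getLast hp < n then p.dropLast ++ [p.getLast hp + 1]
  else pvNxt n p.dropLast ++ [1]
termination_by p.length
decreasing_by
  have := List.length_pos_of_ne_nil hp
  simp [List.length_dropLast]; omega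

def next_r_permutation_with_repetition_alt (permutation : List Int) (n : Int) : List Int :=
  pvNxt n permutation

-- ===== PRECONDITION & SPEC =====
def Spec_next_r_permutation_with_repetition (permutation : List Int) (n : Int) (out : List Int) : Prop := out = next_r_permutation_with_repetition_alt permutation n
instance (permutation : List Int) (n : Int) (out : List Int) : Decidable (Spec_next_r_permutation_with_repetition permutation n out) := by unfold Spec_next_r_permutation_with_repetition; infer_instance

-- ===== CLAIM (what is proved, stated in full; the proofs are below) =====
def Claim_equal_next_r_permutation_with_repetition : Prop := ∀ (permutation : List Int) (n : Int), Dom_next_r_permutation_with_repetition permutation n → Spec_next_r_permutation_with_repetition permutation n (next_r_permutation_with_repetition permutation n)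

-- ===== LEMMAS AND PROOFS =====

lemma pvNxt_nil (n : Int) : pvNxt n [] = [] := by rw [pvNxt]; simp

lemma pvNxt_concat (n d : Int) (ys : List Int) :
    pvNxt n (ys ++ [d]) = if d < n then ys ++ [d + 1] else pvNxt n ys ++ [1] := by
  rw [pvNxt]
  have hne : ys ++ [d] ≠ [] := by simp
  simp [hne, List.getLast_append]

-- A's carry loop over indices ys.length-1 .. 0 computes pvNxt on the first ys.length digits
lemma pvGoA_eq_nxt (n : Int) : ∀ (ys zs : List Int),
    pvGoA n (List.range ys.length).reverse (ys ++ zs) = pvNxt n ys ++ zs := by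
  intro ys
  induction ys using List.reverseRecOn with
  | nil => intro zs; simp [pvGoA, pvNxt_nil]
  | append_singleton ys' d ih =>
    intro zs
    have hrange : (List.range (ys' ++ [d]).length).reverse
        = ys'.length :: (List.range ys'.length).reverse := by
      simp [List.range_succ]
    rw [hrange]
    have hget : PySem.List.pyGet? (ys' ++ [d] ++ zs) (Int.ofNat ys'.length) = some d := by
      simp [PySem.List.pyGet?, PySem.List.pyIdx?]
    have hset : ∀ x : Int, (ys' ++ [d] ++ zs).set ys'.length x = ys' ++ [x] ++ zs := by
      intro x
      rw [List.append_assoc, List.set_append_right _ _ (le_refl _)]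
      simp
    simp only [pvGoA]
    rw [hget, pvNxt_concat]
    by_cases hd : d < n
    · simp only [hd, if_true, hset (d + 1)]
    · simp only [hd, if_false, hset 1]
      rw [List.append_assoc ys' [1] zs, ih ([1] ++ zs)]
      simp

-- ===== VERDICT (by name: the statement is the Claim_ definition above) =====
theorem next_r_permutation_with_repetition_spec : Claim_equal_next_r_permutation_with_repetition := by
  intro permutation n _
  show _ = _
  have hA := pvGoA_eq_nxt n permutation []
  simp only [List.append_nil] at hA
  rw [next_r_permutation_with_repetition, hA, next_r_permutation_with_repetition_alt]
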